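-- pv_equiv track=rewrite | github.com/scmbuildrelease/gitfusionsrc | libexec/p4gf_util.py | p4map_split
-- ===== SOURCE A (Python) =====
-- def p4map_split(line):
--     """Split a single mapping line into (lhs, rhs), stripping " quotes.
--
--     This is a transliteration of P4Python's C++ P4MapMaker::SplitMapping(),
--     with the same behavior for weird cases such as leading spaces or odd
--     numbers of double-quotes.
--     """
--     quoted    = False
--     split     = False  # aka "in rhs"
--     lhs_rhs   = [ [], [] ]
--     i_lhs      = 0
--     i_rhs      = 1
--     dst_index = i_lhs
--
--     for c in line:
--         if c == '"':
--             quoted = not quoted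
--         elif c == ' ':
--             if not quoted and not split:
--                 # Whitespace between lhs and rhs. Skip and start the rhs.
--                 split     = True
--                 dst_index = i_rhs
--             elif not quoted:
--                 # Trailing space on rhs. Ignore
--                 pass
--             else:
--                 # Embedded space. Retain.
--                 lhs_rhs[dst_index].append(c)
--         else:
--             lhs_rhs[dst_index].append(c)
--     if not len(lhs_rhs[i_rhs]):
--         lhs_rhs[i_rhs] = lhs_rhs[i_lhs]
--     return ("".join(lhs_rhs[i_lhs]), "".join(lhs_rhs[i_rhs]))
-- ===== SOURCE B (Python) =====
-- def p4map_split(line):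
--     """Split a single mapping line into (lhs, rhs), stripping " quotes.
--
--     Segment-based re-implementation: split the line on '"' so that segments
--     at odd indices are exactly the quoted runs; walk the segments once,
--     splitting at the first space seen in an unquoted segment.
--     """
--     lhs_parts = []
--     rhs_parts = []
--     in_rhs = False
--     for k, seg in enumerate(line.split('"')):
--         if k % 2:
--             # Quoted run: keep verbatim (spaces included) in the current side.
--             (rhs_parts if in_rhs else lhs_parts).append(seg)
--         elif in_rhs:
--             # Unquoted run after the split point: spaces are dropped.
--             rhs_parts.append(seg.replace(' ', ''))
--         else:
--             j = seg.find(' ')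
--             if j < 0:
--                 lhs_parts.append(seg)
--             else:
--                 # First unquoted space: everything before it ends the lhs.
--                 lhs_parts.append(seg[:j])
--                 rhs_parts.append(seg[j + 1:].replace(' ', ''))
--                 in_rhs = True
--     lhs = ''.join(lhs_parts)
--     rhs = ''.join(rhs_parts) or lhs
--     return (lhs, rhs)
-- ===== Notes on version B (the rewrite author's own statement) =====
-- stated objective: faster
-- what changed: Replaced the per-character state machine (quoted/split/dst_index flags with list-of-chars appends) by splitting the line once on the double-quote character and folding over the resulting segments, where quoting is just the parity of the segment index and the lhs/rhs boundary is found with str.find in an unquoted segment.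
import Mathlib
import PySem

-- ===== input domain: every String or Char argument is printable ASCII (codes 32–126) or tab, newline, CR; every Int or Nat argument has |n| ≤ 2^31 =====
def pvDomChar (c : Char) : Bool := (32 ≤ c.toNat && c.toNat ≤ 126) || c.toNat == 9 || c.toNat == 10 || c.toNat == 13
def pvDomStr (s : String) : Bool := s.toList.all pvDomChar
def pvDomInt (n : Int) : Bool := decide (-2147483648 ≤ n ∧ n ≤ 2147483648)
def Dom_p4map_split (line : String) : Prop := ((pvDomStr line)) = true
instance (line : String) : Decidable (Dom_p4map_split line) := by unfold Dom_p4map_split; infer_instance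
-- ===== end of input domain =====

-- B replaces A's per-character quoted/split/dst_index state machine by one split on the quote
-- character followed by a fold over the segments (quoting = parity of the segment index);
-- same values, measured faster by a constant factor (bulk str operations instead of a char loop).

-- ===== PORT A =====
-- One step of A's `for c in line` loop over state (quoted, split, lhs, rhs).
def p4mapStepA : Bool × Bool × List Char × List Char → Char → Bool × Bool × List Char × List Char
  | (quoted, sp, lhs, rhs), c =>
    if c = '"' then (!quoted, sp, lhs, rhs)
    else if c = ' ' then
      if !quoted && !sp then (quoted, true, lhs, rhs)
      else if !quoted then (quoted, sp, lhs, rhs)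
      else if sp then (quoted, sp, lhs, rhs ++ [c]) else (quoted, sp, lhs ++ [c], rhs)
    else if sp then (quoted, sp, lhs, rhs ++ [c]) else (quoted, sp, lhs ++ [c], rhs)

def p4map_split (line : String) : String × String :=
  let st := line.toList.foldl p4mapStepA (false, false, [], [])
  let lhs := st.2.2.1
  let rhs := st.2.2.2
  if rhs.length = 0 then (String.ofList lhs, String.ofList lhs)
  else (String.ofList lhs, String.ofList rhs)

-- ===== PORT B =====
-- One step of B's `for k, seg in enumerate(line.split('"'))` loop over state (in_rhs, lhs_parts, rhs_parts).
def p4mapStepB : Bool × List (List Char) × List (List Char) → Int × List Char →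
    Bool × List (List Char) × List (List Char)
  | (inRhs, L, R), (k, seg) =>
    if PySem.Int.mod k 2 ≠ 0 then
      if inRhs then (inRhs, L, R ++ [seg]) else (inRhs, L ++ [seg], R)
    else if inRhs then (inRhs, L, R ++ [PySem.Chars.replace seg [' '] []])
    else
      let j := PySem.Chars.find seg [' ']
      if j < 0 then (inRhs, L ++ [seg], R)
      else (true, L ++ [PySem.Chars.slice seg none (some j)],
                  R ++ [PySem.Chars.replace (PySem.Chars.slice seg (some (j + 1)) none) [' '] []])

def p4map_split_alt (line : String) : String × String :=
  let segs := PySem.Chars.splitOn line.toList ['"']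
  let st := (PySem.List.enumerate segs 0).foldl p4mapStepB (false, [], [])
  let lhs := PySem.Chars.join [] st.2.1
  let rhs := PySem.Chars.join [] st.2.2
  if rhs = [] then (String.ofList lhs, String.ofList lhs)
  else (String.ofList lhs, String.ofList rhs)

-- ===== PRECONDITION & SPEC =====
def Spec_p4map_split (line : String) (out : String × String) : Prop := out = p4map_split_alt line
instance (line : String) (out : String × String) : Decidable (Spec_p4map_split line out) := by unfold Spec_p4map_split; infer_instance

-- ===== CLAIM (what is proved, stated in full; the proofs are below) =====
def Claim_equal_p4map_split : Prop := ∀ (line : String), Dom_p4map_split line → Spec_p4map_split line (p4map_split line)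

-- ===== LEMMAS AND PROOFS =====

-- Structural version of splitting a char list on '"'.
def qsplit : List Char → List (List Char)
  | [] => [[]]
  | c :: t => if c = '"' then [] :: qsplit t else (qsplit t).modifyHead (c :: ·)

theorem qsplit_ne_nil (s : List Char) : qsplit s ≠ [] := by
  induction s with
  | nil => simp [qsplit]
  | cons c t ih =>
    simp only [qsplit]
    split_ifs with h
    · simp
    · cases h' : qsplit t with
      | nil => exact absurd h' ih
      | cons a r => simp [List.modifyHead]

-- Structural "split at first space": none if no space, else (before, after).
def splitSp : List Char → Option (List Char × List Char)
  | [] => none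
  | c :: t => if c = ' ' then some ([], t) else (splitSp t).map (fun p => (c :: p.1, p.2))

-- Shared abstract processing of the quote-separated segments.
def procSegs : Bool → Bool → List Char → List Char → List (List Char) → List Char × List Char
  | _, _, l, r, [] => (l, r)
  | true, sp, l, r, seg :: rest =>
      if sp then procSegs false sp l (r ++ seg) rest else procSegs false sp (l ++ seg) r rest
  | false, true, l, r, seg :: rest => procSegs true true l (r ++ seg.filter (· ≠ ' ')) rest
  | false, false, l, r, seg :: rest =>
      match splitSp seg with
      | none => procSegs true false (l ++ seg) r rest
      | some (a, b) => procSegs true true (l ++ a) (r ++ b.filter (· ≠ ' ')) rest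

@[simp] theorem modifyHead_id (l : List (List Char)) :
    l.modifyHead (fun x => x) = l := by cases l <;> simp

theorem splitOn_go_eq (fuel : Nat) : ∀ (l : List Char), l.length ≤ fuel → ∀ (cur : List Char) (acc : List (List Char)),
    PySem.Chars.splitOn.go ['"'] fuel l cur acc
      = acc.reverse ++ (qsplit l).modifyHead (cur.reverse ++ ·) := by
  induction fuel with
  | zero =>
    intro l hl cur acc
    interval_cases hls : l.length
    have : l = [] := List.length_eq_zero_iff.mp hls
    subst this
    simp [PySem.Chars.splitOn.go, qsplit]
  | succ n ih =>
    intro l hl cur acc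
    cases l with
    | nil => simp [PySem.Chars.splitOn.go, qsplit]
    | cons c t =>
      simp only [PySem.Chars.splitOn.go]
      by_cases hc : c = '"'
      · subst hc
        rw [if_pos (by simp [List.isPrefixOf])]
        have hd : List.drop ['"'].length ('"' :: t) = t := rfl
        rw [hd, ih t (by simpa using Nat.lt_succ_iff.mp (by simpa using hl)) [] (cur.reverse :: acc)]
        simp [qsplit]
      · rw [if_neg (by simp [List.isPrefixOf]; exact Ne.symm hc)]
        rw [ih t (by simpa using Nat.lt_succ_iff.mp (by simpa using hl)) (c :: cur) acc]
        simp only [qsplit, if_neg hc]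
        cases h' : qsplit t with
        | nil => exact absurd h' (qsplit_ne_nil t)
        | cons a r => simp [List.modifyHead]

theorem splitOn_eq_qsplit (l : List Char) :
    PySem.Chars.splitOn l ['"'] = qsplit l := by
  unfold PySem.Chars.splitOn
  rw [splitOn_go_eq (l.length + 1) l (by omega) [] []]
  simp

theorem replace_go_eq (fuel : Nat) : ∀ (l : List Char), l.length ≤ fuel → ∀ (acc : List Char),
    PySem.Chars.replace.go [' '] [] fuel l acc = acc.reverse ++ l.filter (· ≠ ' ') := by
  induction fuel with
  | zero =>
    intro l hl acc
    interval_cases hls : l.length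
    have : l = [] := List.length_eq_zero_iff.mp hls
    subst this
    simp [PySem.Chars.replace.go]
  | succ n ih =>
    intro l hl acc
    cases l with
    | nil => simp [PySem.Chars.replace.go]
    | cons c t =>
      simp only [PySem.Chars.replace.go]
      by_cases hc : c = ' '
      · subst hc
        rw [if_pos (by simp [List.isPrefixOf])]
        have hd : List.drop [' '].length (' ' :: t) = t := rfl
        rw [hd, ih t (by simpa using Nat.lt_succ_iff.mp (by simpa using hl)) ([].reverse ++ acc)]
        simp
      · rw [if_neg (by simp [List.isPrefixOf]; exact Ne.symm hc)]
        rw [ih t (by simpa using Nat.lt_succ_iff.mp (by simpa using hl)) (c :: acc)]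
        simp [hc]

theorem replace_eq_filter (l : List Char) :
    PySem.Chars.replace l [' '] [] = l.filter (· ≠ ' ') := by
  unfold PySem.Chars.replace
  rw [if_neg (by simp), replace_go_eq l.length l le_rfl []]
  simp

theorem find_go_eq (l : List Char) : ∀ (k : Nat),
    PySem.Chars.find.go [' '] l k
      = match splitSp l with
        | none => -1
        | some (a, _) => (k : Int) + a.length := by
  induction l with
  | nil => intro k; simp [PySem.Chars.find.go, splitSp]
  | cons c t ih =>
    intro k
    simp only [PySem.Chars.find.go]
    by_cases hc : c = ' '
    · subst hc
      rw [if_pos (by simp [List.isPrefixOf])]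
      simp [splitSp]
    · rw [if_neg (by simp [List.isPrefixOf]; exact Ne.symm hc)]
      rw [ih (k + 1)]
      simp only [splitSp, if_neg hc]
      cases h' : splitSp t with
      | none => simp
      | some p => cases p with
        | mk a b => simp; ring

theorem find_eq_splitSp (l : List Char) :
    PySem.Chars.find l [' ']
      = match splitSp l with
        | none => -1
        | some (a, _) => (a.length : Int) := by
  unfold PySem.Chars.find
  rw [find_go_eq l 0]
  cases h : splitSp l with
  | none => simp
  | some p => cases p; simp

theorem splitSp_some (l : List Char) : ∀ (a b : List Char), splitSp l = some (a, b) →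
    l = a ++ ' ' :: b := by
  induction l with
  | nil => intro a b h; simp [splitSp] at h
  | cons c t ih =>
    intro a b h
    by_cases hc : c = ' '
    · subst hc
      simp only [splitSp] at h
      rw [if_pos trivial] at h
      obtain ⟨ha, hb⟩ : [] = a ∧ t = b := by
        simpa [Prod.ext_iff] using h
      subst ha; subst hb; rfl
    · simp only [splitSp, if_neg hc] at h
      cases h' : splitSp t with
      | none => rw [h'] at h; simp at h
      | some p =>
        rw [h'] at h
        cases p with
        | mk a' b' =>
          simp only [Option.map_some, Option.some.injEq, Prod.mk.injEq] at h
          obtain ⟨ha, hb⟩ := h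
          subst ha; subst hb
          simp [ih a' b' h']

-- A's loop over the remaining characters equals segment processing of qsplit.
theorem foldA_eq_procSegs (s : List Char) : ∀ (q sp : Bool) (l r : List Char),
    ((s.foldl p4mapStepA (q, sp, l, r)).2.2.1, (s.foldl p4mapStepA (q, sp, l, r)).2.2.2)
      = procSegs q sp l r (qsplit s) := by
  induction s with
  | nil =>
    intro q sp l r
    cases q <;> cases sp <;> simp [procSegs, qsplit, splitSp]
  | cons c t ih =>
    intro q sp l r
    by_cases hc : c = '"'
    · subst hc
      have hstep : p4mapStepA (q, sp, l, r) '"' = (!q, sp, l, r) := by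
        simp [p4mapStepA]
      simp only [List.foldl_cons, hstep, qsplit, reduceIte]
      rw [ih (!q) sp l r]
      cases q <;> cases sp <;> simp [procSegs, splitSp]
    · obtain ⟨seg, rest, hq⟩ : ∃ seg rest, qsplit t = seg :: rest := by
        cases h' : qsplit t with
        | nil => exact absurd h' (qsplit_ne_nil t)
        | cons a r' => exact ⟨a, r', rfl⟩
      have hqsc : qsplit (c :: t) = (c :: seg) :: rest := by
        simp [qsplit, if_neg hc, hq, List.modifyHead]
      rw [hqsc]
      by_cases hsp : c = ' '
      · subst hsp
        cases q with
        | true =>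
          cases sp with
          | false =>
            have hstep : p4mapStepA (true, false, l, r) ' ' = (true, false, l ++ [' '], r) := by
              simp [p4mapStepA]
            simp only [List.foldl_cons, hstep]
            rw [ih true false (l ++ [' ']) r, hq]
            simp [procSegs, List.append_assoc]
          | true =>
            have hstep : p4mapStepA (true, true, l, r) ' ' = (true, true, l, r ++ [' ']) := by
              simp [p4mapStepA]
            simp only [List.foldl_cons, hstep]
            rw [ih true true l (r ++ [' ']), hq]
            simp [procSegs, List.append_assoc]
        | false =>
          cases sp with
          | false =>
            have hstep : p4mapStepA (false, false, l, r) ' ' = (false, true, l, r) := by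
              simp [p4mapStepA]
            simp only [List.foldl_cons, hstep]
            rw [ih false true l r, hq]
            simp [procSegs, splitSp]
          | true =>
            have hstep : p4mapStepA (false, true, l, r) ' ' = (false, true, l, r) := by
              simp [p4mapStepA]
            simp only [List.foldl_cons, hstep]
            rw [ih false true l r, hq]
            simp [procSegs]
      · -- ordinary character
        cases q with
        | true =>
          cases sp with
          | false =>
            have hstep : p4mapStepA (true, false, l, r) c = (true, false, l ++ [c], r) := by
              simp [p4mapStepA, hc, hsp]
            simp only [List.foldl_cons, hstep]
            rw [ih true false (l ++ [c]) r, hq]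
            simp [procSegs, List.append_assoc]
          | true =>
            have hstep : p4mapStepA (true, true, l, r) c = (true, true, l, r ++ [c]) := by
              simp [p4mapStepA, hc, hsp]
            simp only [List.foldl_cons, hstep]
            rw [ih true true l (r ++ [c]), hq]
            simp [procSegs, List.append_assoc]
        | false =>
          cases sp with
          | true =>
            have hstep : p4mapStepA (false, true, l, r) c = (false, true, l, r ++ [c]) := by
              simp [p4mapStepA, hc, hsp]
            simp only [List.foldl_cons, hstep]
            rw [ih false true l (r ++ [c]), hq]
            simp [procSegs, hsp, List.append_assoc]
          | false =>
            have hstep : p4mapStepA (false, false, l, r) c = (false, false, l ++ [c], r) := by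
              simp [p4mapStepA, hc, hsp]
            simp only [List.foldl_cons, hstep]
            rw [ih false false (l ++ [c]) r, hq]
            simp only [procSegs, splitSp, if_neg hsp]
            cases h' : splitSp seg with
            | none => simp [List.append_assoc]
            | some p =>
              cases p with
              | mk a b => simp [List.append_assoc]

theorem join_nil_flatten (parts : List (List Char)) :
    PySem.Chars.join [] parts = parts.flatten := by
  induction parts with
  | nil => simp [PySem.Chars.join, List.intercalate]
  | cons p t ih =>
    cases t with
    | nil => simp [PySem.Chars.join, List.intercalate]
    | cons p' t' =>
      simp only [PySem.Chars.join, List.intercalate, List.intersperse] at *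
      simp_all [List.flatten]

theorem int_mod_two_natCast (n : Nat) :
    PySem.Int.mod (n : Int) 2 = ((n % 2 : Nat) : Int) := by
  simp only [PySem.Int.mod]
  rw [Int.fmod_eq_emod, if_pos (Or.inl (by norm_num))]
  omega

-- B's loop over the enumerated segments equals segment processing.
theorem foldB_eq_procSegs (segs : List (List Char)) : ∀ (n : Nat) (sp : Bool) (L R : List (List Char)),
    ((((PySem.List.enumerate segs (n : Int)).foldl p4mapStepB (sp, L, R)).2.1).flatten,
     (((PySem.List.enumerate segs (n : Int)).foldl p4mapStepB (sp, L, R)).2.2).flatten)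
      = procSegs (n % 2 == 1) sp L.flatten R.flatten segs := by
  induction segs with
  | nil => intro n sp L R; simp [PySem.List.enumerate, procSegs]
  | cons seg rest ih =>
    intro n sp L R
    rw [PySem.List.enumerate_cons]
    simp only [List.foldl_cons]
    have hmod : PySem.Int.mod (n : Int) 2 = ((n % 2 : Nat) : Int) := int_mod_two_natCast n
    have hflip : (n + 1) % 2 = if n % 2 = 1 then 0 else 1 := by
      rcases Nat.mod_two_eq_zero_or_one n with h | h <;> simp [h] <;> omega
    by_cases hpar : n % 2 = 1
    · -- quoted segment
      have hne : PySem.Int.mod ((n : Nat) : Int) 2 ≠ 0 := by rw [hmod, hpar]; norm_num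
      have hstep : p4mapStepB (sp, L, R) ((n : Int), seg)
          = if sp then (sp, L, R ++ [seg]) else (sp, L ++ [seg], R) := by
        simp only [p4mapStepB, if_pos hne]
      rw [hstep]
      cases sp with
      | true =>
        rw [if_pos rfl]
        have hih := ih (n + 1) true L (R ++ [seg])
        push_cast at hih ⊢
        rw [hih]
        simp [procSegs, hpar, hflip]
      | false =>
        simp only [Bool.false_eq_true, if_false]
        have hih := ih (n + 1) false (L ++ [seg]) R
        push_cast at hih ⊢
        rw [hih]
        simp [procSegs, hpar, hflip]
    · -- unquoted segment
      have hpar0 : n % 2 = 0 := by omega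
      have heq : ¬ (PySem.Int.mod ((n : Nat) : Int) 2 ≠ 0) := by rw [hmod, hpar0]; norm_num
      cases sp with
      | true =>
        have hstep : p4mapStepB (true, L, R) ((n : Int), seg)
            = (true, L, R ++ [PySem.Chars.replace seg [' '] []]) := by
          simp only [p4mapStepB, if_neg heq]
          simp
        rw [hstep]
        have hih := ih (n + 1) true L (R ++ [PySem.Chars.replace seg [' '] []])
        push_cast at hih ⊢
        rw [hih]
        simp [procSegs, hpar0, hflip, replace_eq_filter]
      | false =>
        cases hss : splitSp seg with
        | none =>
          have hfind : PySem.Chars.find seg [' '] = -1 := by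
            rw [find_eq_splitSp, hss]
          have hstep : p4mapStepB (false, L, R) ((n : Int), seg)
              = (false, L ++ [seg], R) := by
            simp only [p4mapStepB, if_neg heq, hfind]
            simp
          rw [hstep]
          have hih := ih (n + 1) false (L ++ [seg]) R
          push_cast at hih ⊢
          rw [hih]
          simp [procSegs, hpar0, hflip, hss]
        | some p =>
          obtain ⟨a, b⟩ := p
          have hseg : seg = a ++ ' ' :: b := splitSp_some seg a b hss
          have hfind : PySem.Chars.find seg [' '] = (a.length : Int) := by
            rw [find_eq_splitSp, hss]
          have hslice1 : PySem.Chars.slice seg none (some ((a.length : Int))) = a := by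
            simp only [PySem.Chars.slice]
            rw [PySem.List.slice_to seg (Int.natCast_nonneg _)]
            rw [hseg]
            simp only [Int.toNat_natCast]
            exact List.take_left ..
          have hslice2 : PySem.Chars.slice seg (some ((a.length : Int) + 1)) none = b := by
            simp only [PySem.Chars.slice]
            rw [PySem.List.slice_from seg (by omega)]
            have ht : ((a.length : Int) + 1).toNat = a.length + 1 := by omega
            rw [ht, hseg]
            rw [show a ++ ' ' :: b = (a ++ [' ']) ++ b by simp]
            rw [show a.length + 1 = (a ++ [' ']).length by simp]
            exact List.drop_left ..
          have hstep : p4mapStepB (false, L, R) ((n : Int), seg)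
              = (true, L ++ [a], R ++ [PySem.Chars.replace b [' '] []]) := by
            simp only [p4mapStepB, if_neg heq, hfind]
            rw [if_neg (by simp)]
            rw [if_neg (by omega)]
            rw [hslice1, hslice2]
          rw [hstep]
          have hih := ih (n + 1) true (L ++ [a]) (R ++ [PySem.Chars.replace b [' '] []])
          push_cast at hih ⊢
          rw [hih]
          simp [procSegs, hpar0, hflip, hss, replace_eq_filter]

-- ===== VERDICT (by name: the statement is the Claim_ definition above) =====
theorem p4map_split_spec : Claim_equal_p4map_split := by
  intro line _
  unfold Spec_p4map_split
  simp only [p4map_split, p4map_split_alt]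
  have hA := foldA_eq_procSegs line.toList false false [] []
  have hB := foldB_eq_procSegs (PySem.Chars.splitOn line.toList ['"']) 0 false [] []
  rw [splitOn_eq_qsplit] at hB
  norm_num at hB
  have hAB := hA.trans hB.symm
  have h1 := congrArg Prod.fst hAB
  have h2 := congrArg Prod.snd hAB
  simp only at h1 h2
  simp only [splitOn_eq_qsplit, join_nil_flatten]
  rw [← h1, ← h2]
  by_cases hr : (List.foldl p4mapStepA (false, false, [], []) line.toList).2.2.2 = []
  · simp [hr]
  · simp [hr, List.length_eq_zero_iff]
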